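-- pv_equiv track=rewrite | github.com/Sharon-Rong/Optimized-Space-Syntax-Algorithm-Model | space syntax with python.py | bfs_max_steps
-- ===== SOURCE A (Python) =====
-- from collections import deque
--
-- def bfs_max_steps(graph, start_node, max_steps):
--     visited = set()
--     queue = deque([(start_node, 0)])
--     result = []
--
--     while queue:
--         node, steps = queue.popleft()
--         visited.add(node)
--         result.append((node, steps))
--
--         if steps < max_steps:
--             if node in graph:
--                 neighbors = graph[node]
--                 for neighbor in neighbors:
--                     if neighbor not in visited:
--                         queue.append((neighbor, steps + 1))
--                         visited.add(neighbor)
--     return result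
-- ===== SOURCE B (Python) =====
-- def bfs_max_steps(graph, start_node, max_steps):
--     visited = {start_node}
--     frontier = [start_node]
--     result = []
--     step = 0
--     while frontier:
--         for node in frontier:
--             result.append((node, step))
--         if step >= max_steps:
--             break
--         nxt = []
--         for node in frontier:
--             if node in graph:
--                 for nb in graph[node]:
--                     if nb not in visited:
--                         visited.add(nb)
--                         nxt.append(nb)
--         frontier = nxt
--         step += 1
--     return result
-- ===== Notes on version B (the rewrite author's own statement) =====
-- stated objective: alternative
-- what changed: Replaces the single FIFO queue of (node, step) pairs by a level-synchronous BFS: a plain frontier list per step, the whole level is emitted at once and expanded into the next frontier, so no step counters are carried in the worklist.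
import Mathlib
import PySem

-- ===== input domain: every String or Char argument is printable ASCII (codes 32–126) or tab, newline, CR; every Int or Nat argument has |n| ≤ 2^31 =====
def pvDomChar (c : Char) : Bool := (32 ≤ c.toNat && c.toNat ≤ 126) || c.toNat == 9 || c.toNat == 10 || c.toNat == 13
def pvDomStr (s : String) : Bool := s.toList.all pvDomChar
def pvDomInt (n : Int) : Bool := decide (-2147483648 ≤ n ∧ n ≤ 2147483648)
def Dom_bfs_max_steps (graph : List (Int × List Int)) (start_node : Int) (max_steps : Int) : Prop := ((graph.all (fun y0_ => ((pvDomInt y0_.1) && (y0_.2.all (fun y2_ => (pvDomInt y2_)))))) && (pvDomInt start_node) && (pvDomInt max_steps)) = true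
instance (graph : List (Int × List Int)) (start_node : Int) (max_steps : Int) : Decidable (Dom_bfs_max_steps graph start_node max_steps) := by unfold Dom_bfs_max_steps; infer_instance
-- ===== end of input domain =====

-- B replaces A's single FIFO queue of (node, step) pairs by a level-synchronous BFS
-- (frontier list per step, whole level emitted then expanded); alternative decomposition, same results.

-- ===== PORT A =====

-- all node values that can ever be newly enqueued (termination measure only)
def pvPool (graph : List (Int × List Int)) : List Int := graph.flatMap (fun p => p.2)

-- number of pool entries not yet visited (termination measure only)
def pvCfree (graph : List (Int × List Int)) (v : PySem.Set Int) : Nat :=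
  (pvPool graph).countP (fun y => decide (y ∉ v))

lemma pvCfree_add_le (graph : List (Int × List Int)) (v : PySem.Set Int) (x : Int) :
    pvCfree graph (PySem.Set.add v x) ≤ pvCfree graph v := by
  apply List.countP_mono_left
  intro a _ h
  simp only [decide_eq_true_eq] at h ⊢
  exact fun hv => h ((PySem.Set.mem_add _ _ _).mpr (Or.inl hv))

lemma pvCfree_add_lt (graph : List (Int × List Int)) (v : PySem.Set Int) (x : Int)
    (hx : x ∈ pvPool graph) (hv : x ∉ v) :
    pvCfree graph (PySem.Set.add v x) < pvCfree graph v := by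
  unfold pvCfree
  revert hx
  generalize pvPool graph = l
  intro hx
  induction l with
  | nil => cases hx
  | cons a l ih =>
    have hmono : l.countP (fun y => decide (y ∉ PySem.Set.add v x)) ≤
        l.countP (fun y => decide (y ∉ v)) := by
      apply List.countP_mono_left
      intro b _ h
      simp only [decide_eq_true_eq] at h ⊢
      exact fun hb => h ((PySem.Set.mem_add _ _ _).mpr (Or.inl hb))
    rw [List.countP_cons, List.countP_cons]
    by_cases hax : a = x
    · subst hax
      have e1 : (decide (a ∉ PySem.Set.add v a)) = false := by
        simp [PySem.Set.mem_add]
      have e2 : (decide (a ∉ v)) = true := by simp [hv]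
      simp only [e1, e2, Bool.false_eq_true, if_false, if_true]
      omega
    · rcases List.mem_cons.mp hx with h | h
      · exact absurd h.symm hax
      · have hstrict := ih h
        have hhead : (if (decide (a ∉ PySem.Set.add v x)) = true then 1 else 0) ≤
            (if (decide (a ∉ v)) = true then 1 else 0) := by
          split_ifs with h1 h2
          · omega
          · exfalso
            simp only [decide_eq_true_eq] at h1 h2
            exact h1 ((PySem.Set.mem_add _ _ _).mpr (Or.inl (not_not.mp h2)))
          · omega
          · omega
        omega

lemma pvPool_of_get? (graph : List (Int × List Int)) (node : Int) (nbs : List Int)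
    (h : PySem.Dict.get? (PySem.Dict.mk graph) node = some nbs) :
    ∀ x ∈ nbs, x ∈ pvPool graph := by
  induction graph with
  | nil => simp [PySem.Dict.get?] at h
  | cons p rest ih =>
    rw [PySem.Dict.get?_mk_cons] at h
    have hpool : pvPool (p :: rest) = p.2 ++ pvPool rest := by simp [pvPool]
    by_cases hk : p.1 == node
    · simp [hk] at h
      intro x hx
      rw [hpool]
      exact List.mem_append.mpr (Or.inl (by rw [h]; exact hx))
    · simp [hk] at h
      intro x hx
      rw [hpool]
      exact List.mem_append.mpr (Or.inr (ih h x hx))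

-- A's inner for-loop over neighbors: enqueue unvisited neighbors with step+1, mark visited
def pvEnqA (steps : Int) (qv : List (Int × Int) × PySem.Set Int) (nbs : List Int) :
    List (Int × Int) × PySem.Set Int :=
  nbs.foldl (fun qv nb =>
    if PySem.Set.contains qv.2 nb then qv
    else (qv.1 ++ [(nb, steps + 1)], PySem.Set.add qv.2 nb)) qv

lemma pvEnqA_cons (s nb : Int) (nbs : List Int) (q : List (Int × Int)) (v : PySem.Set Int) :
    pvEnqA s (q, v) (nb :: nbs) =
      if nb ∈ v then pvEnqA s (q, v) nbs
      else pvEnqA s (q ++ [(nb, s + 1)], PySem.Set.add v nb) nbs := by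
  by_cases hc : nb ∈ v
  · simp [pvEnqA, List.foldl_cons, hc]
  · simp [pvEnqA, List.foldl_cons, hc]

lemma pvEnqA_measure (graph : List (Int × List Int)) (s : Int) :
    ∀ (nbs : List Int) (q : List (Int × Int)) (v : PySem.Set Int),
      (∀ x ∈ nbs, x ∈ pvPool graph) →
      (pvEnqA s (q, v) nbs).1.length + pvCfree graph (pvEnqA s (q, v) nbs).2 ≤
        q.length + pvCfree graph v := by
  intro nbs
  induction nbs with
  | nil => intro q v _; simp [pvEnqA]
  | cons nb nbs ih =>
    intro q v hpool
    rw [pvEnqA_cons]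
    by_cases hc : nb ∈ v
    · rw [if_pos hc]
      exact ih q v (fun x hx => hpool x (List.mem_cons_of_mem _ hx))
    · rw [if_neg hc]
      have h1 := ih (q ++ [(nb, s + 1)]) (PySem.Set.add v nb)
        (fun x hx => hpool x (List.mem_cons_of_mem _ hx))
      have h2 : pvCfree graph (PySem.Set.add v nb) < pvCfree graph v :=
        pvCfree_add_lt graph v nb (hpool nb (List.mem_cons_self ..)) hc
      simp only [List.length_append, List.length_cons, List.length_nil] at h1 ⊢
      omega

lemma pvDecA1 (graph : List (Int × List Int)) (node steps : Int) (rest : List (Int × Int))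
    (visited : PySem.Set Int) (nbs : List Int)
    (h : PySem.Dict.get? (PySem.Dict.mk graph) node = some nbs) :
    (pvEnqA steps (rest, PySem.Set.add visited node) nbs).1.length +
        pvCfree graph (pvEnqA steps (rest, PySem.Set.add visited node) nbs).2 <
      ((node, steps) :: rest).length + pvCfree graph visited := by
  have h1 := pvEnqA_measure graph steps nbs rest (PySem.Set.add visited node)
    (pvPool_of_get? graph node nbs h)
  have h2 := pvCfree_add_le graph visited node
  simp only [List.length_cons]
  omega

lemma pvDecA2 (graph : List (Int × List Int)) (node steps : Int) (rest : List (Int × Int))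
    (visited : PySem.Set Int) :
    rest.length + pvCfree graph (PySem.Set.add visited node) <
      ((node, steps) :: rest).length + pvCfree graph visited := by
  have h2 := pvCfree_add_le graph visited node
  simp only [List.length_cons]
  omega

-- A's while loop over the queue
def pvLoopA (graph : List (Int × List Int)) (max_steps : Int) :
    List (Int × Int) → PySem.Set Int → List (Int × Int)
  | [], _ => []
  | (node, steps) :: rest, visited =>
    let v1 := PySem.Set.add visited node
    (node, steps) ::
      (if steps < max_steps then
        match h : PySem.Dict.get? (PySem.Dict.mk graph) node with
        | some nbs =>
          let qv := pvEnqA steps (rest, v1) nbs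
          pvLoopA graph max_steps qv.1 qv.2
        | none => pvLoopA graph max_steps rest v1
      else pvLoopA graph max_steps rest v1)
  termination_by q v => q.length + pvCfree graph v
  decreasing_by
  · exact pvDecA1 graph node steps rest visited nbs h
  · exact pvDecA2 graph node steps rest visited
  · exact pvDecA2 graph node steps rest visited

def bfs_max_steps (graph : List (Int × List Int)) (start_node : Int) (max_steps : Int) : List (Int × Int) :=
  pvLoopA graph max_steps [(start_node, 0)] PySem.Set.empty

-- ===== PORT B =====

-- B's inner neighbor loop: collect unseen neighbors into the next frontier
def pvEnqB (qv : List Int × PySem.Set Int) (nbs : List Int) : List Int × PySem.Set Int :=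
  nbs.foldl (fun qv nb =>
    if PySem.Set.contains qv.2 nb then qv
    else (qv.1 ++ [nb], PySem.Set.add qv.2 nb)) qv

-- expand one frontier node (if node in graph)
def pvExpandNode (graph : List (Int × List Int)) (p : List Int × PySem.Set Int) (node : Int) :
    List Int × PySem.Set Int :=
  match PySem.Dict.get? (PySem.Dict.mk graph) node with
  | some nbs => pvEnqB p nbs
  | none => p

lemma pvDecB (max_steps step : Int) (h : step < max_steps) :
    (max_steps - (step + 1)).toNat < (max_steps - step).toNat := by omega

-- B's level-synchronous loop
def pvLoopB (graph : List (Int × List Int)) (max_steps : Int)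
    (frontier : List Int) (visited : PySem.Set Int) (step : Int) : List (Int × Int) :=
  if frontier = [] then []
  else
    frontier.map (fun n => (n, step)) ++
      (if step < max_steps then
        let p := frontier.foldl (pvExpandNode graph) ([], visited)
        pvLoopB graph max_steps p.1 p.2 (step + 1)
      else [])
  termination_by (max_steps - step).toNat
  decreasing_by exact pvDecB max_steps step (by assumption)

def bfs_max_steps_alt (graph : List (Int × List Int)) (start_node : Int) (max_steps : Int) : List (Int × Int) :=
  pvLoopB graph max_steps [start_node] (PySem.Set.add PySem.Set.empty start_node) 0

-- ===== PRECONDITION & SPEC =====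
def Spec_bfs_max_steps (graph : List (Int × List Int)) (start_node : Int) (max_steps : Int) (out : List (Int × Int)) : Prop := out = bfs_max_steps_alt graph start_node max_steps
instance (graph : List (Int × List Int)) (start_node : Int) (max_steps : Int) (out : List (Int × Int)) : Decidable (Spec_bfs_max_steps graph start_node max_steps out) := by unfold Spec_bfs_max_steps; infer_instance

-- ===== CLAIM (what is proved, stated in full; the proofs are below) =====
def Claim_equal_bfs_max_steps : Prop := ∀ (graph : List (Int × List Int)) (start_node : Int) (max_steps : Int), Dom_bfs_max_steps graph start_node max_steps → Spec_bfs_max_steps graph start_node max_steps (bfs_max_steps graph start_node max_steps)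

-- ===== LEMMAS AND PROOFS =====

lemma pvEnqB_cons (nb : Int) (nbs : List Int) (q : List Int) (v : PySem.Set Int) :
    pvEnqB (q, v) (nb :: nbs) =
      if nb ∈ v then pvEnqB (q, v) nbs
      else pvEnqB (q ++ [nb], PySem.Set.add v nb) nbs := by
  by_cases hc : nb ∈ v
  · simp [pvEnqB, List.foldl_cons, hc]
  · simp [pvEnqB, List.foldl_cons, hc]

-- A's enqueue on a queue 'prefix ++ tagged ints' is B's enqueue on the ints, tagged afterwards
lemma pvEnq_commute (s : Int) :
    ∀ (nbs : List Int) (P : List (Int × Int)) (q : List Int) (v : PySem.Set Int),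
      pvEnqA s (P ++ q.map (fun n => (n, s + 1)), v) nbs =
        (P ++ ((pvEnqB (q, v) nbs).1).map (fun n => (n, s + 1)), (pvEnqB (q, v) nbs).2) := by
  intro nbs
  induction nbs with
  | nil => intro P q v; simp [pvEnqA, pvEnqB]
  | cons nb nbs ih =>
    intro P q v
    rw [pvEnqA_cons, pvEnqB_cons]
    by_cases hc : nb ∈ v
    · rw [if_pos hc, if_pos hc]
      exact ih P q v
    · rw [if_neg hc, if_neg hc]
      have : P ++ q.map (fun n => (n, s + 1)) ++ [(nb, s + 1)] =
          P ++ (q ++ [nb]).map (fun n => (n, s + 1)) := by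
        simp [List.map_append]
      rw [this]
      exact ih P (q ++ [nb]) (PySem.Set.add v nb)

lemma pvEnqB_mono : ∀ (nbs : List Int) (q : List Int) (v : PySem.Set Int) (x : Int),
    x ∈ v → x ∈ (pvEnqB (q, v) nbs).2 := by
  intro nbs
  induction nbs with
  | nil => intro q v x hx; simpa [pvEnqB] using hx
  | cons nb nbs ih =>
    intro q v x hx
    rw [pvEnqB_cons]
    by_cases hc : nb ∈ v
    · rw [if_pos hc]; exact ih q v x hx
    · rw [if_neg hc]
      exact ih (q ++ [nb]) (PySem.Set.add v nb) x ((PySem.Set.mem_add _ _ _).mpr (Or.inl hx))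

lemma pvEnqB_inv : ∀ (nbs : List Int) (q : List Int) (v : PySem.Set Int),
    (∀ x ∈ q, x ∈ v) → ∀ x ∈ (pvEnqB (q, v) nbs).1, x ∈ (pvEnqB (q, v) nbs).2 := by
  intro nbs
  induction nbs with
  | nil => intro q v hq; simpa [pvEnqB] using hq
  | cons nb nbs ih =>
    intro q v hq
    rw [pvEnqB_cons]
    by_cases hc : nb ∈ v
    · rw [if_pos hc]; exact ih q v hq
    · rw [if_neg hc]
      apply ih (q ++ [nb]) (PySem.Set.add v nb)
      intro x hx
      rw [PySem.Set.mem_add]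
      rcases List.mem_append.mp hx with h | h
      · exact Or.inl (hq x h)
      · simp at h; exact Or.inr h

lemma pvExpand_inv (graph : List (Int × List Int)) :
    ∀ (cur : List Int) (q : List Int) (v : PySem.Set Int),
      (∀ x ∈ q, x ∈ v) →
      ∀ x ∈ (cur.foldl (pvExpandNode graph) (q, v)).1, x ∈ (cur.foldl (pvExpandNode graph) (q, v)).2 := by
  intro cur
  induction cur with
  | nil => intro q v hq; simpa using hq
  | cons c cs ih =>
    intro q v hq
    simp only [List.foldl_cons]
    rcases hE : pvExpandNode graph (q, v) c with ⟨q', v'⟩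
    apply ih q' v'
    unfold pvExpandNode at hE
    rcases hg : PySem.Dict.get? (PySem.Dict.mk graph) c with _ | nbs
    · rw [hg] at hE; simp at hE
      rw [← hE.1, ← hE.2]; exact hq
    · rw [hg] at hE; simp at hE
      intro x hx
      have := pvEnqB_inv nbs q v hq x
      rw [hE] at this; exact this hx

-- processing one whole level of A's queue equals emitting it and expanding it level-wise
lemma pvLevelA (graph : List (Int × List Int)) (max_steps s : Int) (hs : s < max_steps) :
    ∀ (cur nxt : List Int) (v : PySem.Set Int),
      (∀ x ∈ cur, x ∈ v) →
      pvLoopA graph max_steps (cur.map (fun n => (n, s)) ++ nxt.map (fun n => (n, s + 1))) v =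
        cur.map (fun n => (n, s)) ++
          pvLoopA graph max_steps
            ((cur.foldl (pvExpandNode graph) (nxt, v)).1.map (fun n => (n, s + 1)))
            (cur.foldl (pvExpandNode graph) (nxt, v)).2 := by
  intro cur
  induction cur with
  | nil => intro nxt v _; simp
  | cons c cs ih =>
    intro nxt v hcur
    have hvc : PySem.Set.add v c = v :=
      PySem.Set.add_of_mem (hcur c (List.mem_cons_self ..))
    rw [List.map_cons, List.cons_append, pvLoopA]
    simp only [hvc, hs, if_true]
    rw [List.foldl_cons]
    split
    next nbs h =>
      have hEx : pvExpandNode graph (nxt, v) c = pvEnqB (nxt, v) nbs := by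
        unfold pvExpandNode; rw [h]
      rw [hEx, List.cons_append]
      congr 1
      rw [pvEnq_commute s nbs (cs.map (fun n => (n, s))) nxt v]
      rcases hB : pvEnqB (nxt, v) nbs with ⟨nxt', v'⟩
      have hcs' : ∀ x ∈ cs, x ∈ v' := by
        intro x hx
        have := pvEnqB_mono nbs nxt v x (hcur x (List.mem_cons_of_mem _ hx))
        rw [hB] at this; exact this
      exact ih nxt' v' hcs'
    next h =>
      have hEx : pvExpandNode graph (nxt, v) c = (nxt, v) := by
        unfold pvExpandNode; rw [h]
      rw [hEx, List.cons_append]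
      congr 1
      exact ih nxt v (fun x hx => hcur x (List.mem_cons_of_mem _ hx))

-- once step = max_steps, A just drains the (already-visited) level
lemma pvCapA (graph : List (Int × List Int)) (max_steps s : Int) (hs : ¬ s < max_steps) :
    ∀ (cur : List Int) (v : PySem.Set Int),
      (∀ x ∈ cur, x ∈ v) →
      pvLoopA graph max_steps (cur.map (fun n => (n, s))) v = cur.map (fun n => (n, s)) := by
  intro cur
  induction cur with
  | nil => intro v _; simp [pvLoopA]
  | cons c cs ih =>
    intro v hcur
    have hvc : PySem.Set.add v c = v :=
      PySem.Set.add_of_mem (hcur c (List.mem_cons_self ..))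
    rw [List.map_cons, pvLoopA]
    simp only [hvc, hs, if_false]
    rw [ih v (fun x hx => hcur x (List.mem_cons_of_mem _ hx))]

lemma pvMain (graph : List (Int × List Int)) (max_steps : Int) :
    ∀ (n : Nat) (s : Int) (frontier : List Int) (v : PySem.Set Int),
      (max_steps - s).toNat = n →
      (∀ x ∈ frontier, x ∈ v) →
      pvLoopB graph max_steps frontier v s =
        pvLoopA graph max_steps (frontier.map (fun n => (n, s))) v := by
  intro n
  induction n using Nat.strong_induction_on with
  | _ n ih =>
    intro s frontier v hn hf
    by_cases hemp : frontier = []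
    · subst hemp; rw [pvLoopB]; simp [pvLoopA]
    · rw [pvLoopB]
      simp only [hemp, if_false]
      by_cases hs : s < max_steps
      · simp only [hs, if_true]
        have hL := pvLevelA graph max_steps s hs frontier [] v hf
        simp only [List.map_nil, List.append_nil] at hL
        rw [hL]
        congr 1
        rcases hR : frontier.foldl (pvExpandNode graph) ([], v) with ⟨f', v'⟩
        have hinv : ∀ x ∈ f', x ∈ v' := by
          intro x hx
          have := pvExpand_inv graph frontier [] v (by simp) x
          rw [hR] at this; exact this hx
        exact ih (max_steps - (s + 1)).toNat (by omega) (s + 1) f' v' rfl hinv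
      · simp only [hs, if_false, List.append_nil]
        rw [pvCapA graph max_steps s hs frontier v hf]

-- ===== VERDICT (by name: the statement is the Claim_ definition above) =====
theorem bfs_max_steps_spec : Claim_equal_bfs_max_steps := by
  intro graph start_node max_steps _
  unfold Spec_bfs_max_steps bfs_max_steps bfs_max_steps_alt
  have hmem : start_node ∈ PySem.Set.add PySem.Set.empty start_node :=
    (PySem.Set.mem_add _ _ _).mpr (Or.inr rfl)
  rw [pvMain graph max_steps (max_steps - 0).toNat 0 [start_node]
      (PySem.Set.add PySem.Set.empty start_node) rfl (by simpa using hmem)]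
  rw [List.map_cons, List.map_nil]
  conv_lhs => rw [pvLoopA]
  conv_rhs => rw [pvLoopA]
  simp
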